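-- pv_equiv track=rewrite | github.com/pypi-data/pypi-mirror-106 | packages/pbrats/pbrats-0.3.0-py3-none-any.whl/pbr/pbr.py | html_suit
-- ===== SOURCE A (Python) =====
-- def html_suit(contract):
--     suit_css = {
--         'S':  "<font color=black>&spades;</font>",
--         "H":  "<font color=red>&hearts;</font>",
--         "D":  "<font color=red>&diams;</font>",
--         "C":  "<font color=black>&clubs;</font>"
--     }
--     for k,v in suit_css.items():
--         contract = contract.replace(k, v)
--     return contract
-- ===== SOURCE B (Python) =====
-- def html_suit(contract):
--     out = []
--     for c in contract:
--         if c == 'S':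
--             out.append("<font color=black>&spades;</font>")
--         elif c == 'H':
--             out.append("<font color=red>&hearts;</font>")
--         elif c == 'D':
--             out.append("<font color=red>&diams;</font>")
--         elif c == 'C':
--             out.append("<font color=black>&clubs;</font>")
--         else:
--             out.append(c)
--     return ''.join(out)
-- ===== Notes on version B (the rewrite author's own statement) =====
-- stated objective: alternative
-- what changed: Drops the suit dict and the four sequential full-string str.replace passes entirely: a single character-level loop with an explicit if/elif branch chain appends each piece to a list, joined once at the end.
import Mathlib
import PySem

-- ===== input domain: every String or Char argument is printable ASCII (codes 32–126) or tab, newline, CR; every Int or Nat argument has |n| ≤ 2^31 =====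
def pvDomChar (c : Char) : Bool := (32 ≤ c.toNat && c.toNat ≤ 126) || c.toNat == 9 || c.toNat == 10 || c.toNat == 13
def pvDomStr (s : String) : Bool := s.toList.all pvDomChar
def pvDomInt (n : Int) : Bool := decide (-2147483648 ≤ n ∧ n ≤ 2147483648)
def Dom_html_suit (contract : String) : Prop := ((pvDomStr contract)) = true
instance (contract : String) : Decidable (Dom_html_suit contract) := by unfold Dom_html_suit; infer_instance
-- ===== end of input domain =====

-- B drops A's dict and its four sequential full-string replace passes: one
-- character-level loop with an explicit branch chain, joined once (alternative decomposition, same results).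


-- ===== PORT A =====
-- the dict literal, then `for k,v in suit_css.items(): contract = contract.replace(k, v)`
def html_suit (contract : String) : String :=
  let suit_css : PySem.Dict String String := PySem.Dict.ofList
    [("S", "<font color=black>&spades;</font>"),
     ("H", "<font color=red>&hearts;</font>"),
     ("D", "<font color=red>&diams;</font>"),
     ("C", "<font color=black>&clubs;</font>")]
  suit_css.items.foldl (fun acc kv => PySem.Str.replace acc kv.1 kv.2) contract

-- ===== PORT B =====
-- the per-character loop: for each char append the branch-chain's piece, then ''.join(out)
def htmlSuitPieces : List Char → List String
  | [] => []
  | c :: rest =>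
    (if c = 'S' then "<font color=black>&spades;</font>"
     else if c = 'H' then "<font color=red>&hearts;</font>"
     else if c = 'D' then "<font color=red>&diams;</font>"
     else if c = 'C' then "<font color=black>&clubs;</font>"
     else String.ofList [c]) :: htmlSuitPieces rest

def html_suit_alt (contract : String) : String :=
  PySem.Str.join "" (htmlSuitPieces contract.toList)

-- ===== PRECONDITION & SPEC =====
def Spec_html_suit (contract : String) (out : String) : Prop := out = html_suit_alt contract
instance (contract : String) (out : String) : Decidable (Spec_html_suit contract out) := by unfold Spec_html_suit; infer_instance

-- ===== CLAIM (what is proved, stated in full; the proofs are below) =====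
def Claim_equal_html_suit : Prop := ∀ (contract : String), Dom_html_suit contract → Spec_html_suit contract (html_suit contract)

-- ===== LEMMAS AND PROOFS =====

-- replacing a single-character pattern is a per-character flatMap
theorem pv_go_single (k : Char) (v : List Char) :
    ∀ (l : List Char) (fuel : Nat) (acc : List Char), l.length ≤ fuel →
      PySem.Chars.replace.go [k] v fuel l acc
        = acc.reverse ++ l.flatMap (fun c => if c = k then v else [c]) := by
  intro l
  induction l with
  | nil => intro fuel acc h; cases fuel <;> simp [PySem.Chars.replace.go]
  | cons c t ih =>
    intro fuel acc h
    cases fuel with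
    | zero => simp at h
    | succ fuel =>
      rw [show PySem.Chars.replace.go [k] v (fuel+1) (c::t) acc =
            (if [k].isPrefixOf (c::t) = true then
              PySem.Chars.replace.go [k] v fuel (List.drop [k].length (c::t)) (v.reverse ++ acc)
            else PySem.Chars.replace.go [k] v fuel t (c :: acc)) from rfl]
      have ht : t.length ≤ fuel := by simpa using h
      by_cases hc : k = c
      · subst hc
        have hp : [k].isPrefixOf (k::t) = true := by simp [List.isPrefixOf]
        rw [if_pos hp, show List.drop [k].length (k::t) = t from rfl, ih fuel _ ht]
        simp
      · have hp : ([k].isPrefixOf (c::t)) = false := by simp [List.isPrefixOf, hc]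
        rw [hp]
        simp only [Bool.false_eq_true, if_false]
        rw [ih fuel _ ht]
        have hck : ¬ c = k := fun hh => hc hh.symm
        simp [List.flatMap_cons, hck]

theorem pv_replace_single (s : List Char) (k : Char) (v : List Char) :
    PySem.Chars.replace s [k] v = s.flatMap (fun c => if c = k then v else [c]) := by
  have h := pv_go_single k v s s.length [] (le_refl _)
  simpa [PySem.Chars.replace] using h

theorem pv_flatMap_comp (s : List Char) (f g : Char → List Char) :
    (s.flatMap f).flatMap g = s.flatMap (fun c => (f c).flatMap g) := by
  induction s with
  | nil => rfl
  | cons c t ih => simp [List.flatMap_cons, List.flatMap_append, ih]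

theorem pv_join_empty (xs : List (List Char)) : PySem.Chars.join [] xs = xs.flatten := by
  simp only [PySem.Chars.join]
  induction xs with
  | nil => rfl
  | cons a t ih =>
    cases t with
    | nil => simp [List.intercalate]
    | cons b u => simp_all [List.intercalate, List.intersperse]

theorem pv_flatMap_congr (s : List Char) (f g : Char → List Char)
    (h : ∀ c, f c = g c) : s.flatMap f = s.flatMap g := by
  induction s with
  | nil => rfl
  | cons c t ih => simp [List.flatMap_cons, ih, h c]

-- the B-side recursion is a map over the characters
theorem pv_pieces_map (l : List Char) :
    htmlSuitPieces l = l.map (fun c =>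
      if c = 'S' then "<font color=black>&spades;</font>"
      else if c = 'H' then "<font color=red>&hearts;</font>"
      else if c = 'D' then "<font color=red>&diams;</font>"
      else if c = 'C' then "<font color=black>&clubs;</font>"
      else String.ofList [c]) := by
  induction l with
  | nil => rfl
  | cons c t ih => simp [htmlSuitPieces, ih]

theorem pv_main (s : String) : html_suit s = html_suit_alt s := by
  rw [← String.toList_inj]
  unfold html_suit html_suit_alt
  simp only []
  have hitems : (PySem.Dict.ofList
      [(("S":String), ("<font color=black>&spades;</font>":String)),
       ("H", "<font color=red>&hearts;</font>"),
       ("D", "<font color=red>&diams;</font>"),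
       ("C", "<font color=black>&clubs;</font>")]).items
      = [("S", "<font color=black>&spades;</font>"),
         ("H", "<font color=red>&hearts;</font>"),
         ("D", "<font color=red>&diams;</font>"),
         ("C", "<font color=black>&clubs;</font>")] := by decide
  rw [hitems]
  simp only [List.foldl_cons, List.foldl_nil]
  rw [PySem.Str.toList_join, pv_pieces_map]
  simp only [PySem.Str.toList_replace, List.map_map]
  rw [show ("":String).toList = [] from rfl, pv_join_empty, ← List.flatMap_def]
  rw [show ("S":String).toList = ['S'] from rfl, show ("H":String).toList = ['H'] from rfl,
      show ("D":String).toList = ['D'] from rfl, show ("C":String).toList = ['C'] from rfl]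
  rw [pv_replace_single, pv_replace_single, pv_replace_single, pv_replace_single,
      pv_flatMap_comp, pv_flatMap_comp, pv_flatMap_comp]
  apply pv_flatMap_congr
  intro c
  by_cases hS : c = 'S'
  · subst hS; decide
  by_cases hH : c = 'H'
  · subst hH; decide
  by_cases hD : c = 'D'
  · subst hD; decide
  by_cases hC : c = 'C'
  · subst hC; decide
  · simp [if_neg hS, if_neg hH, if_neg hD, if_neg hC]

-- ===== VERDICT (by name: the statement is the Claim_ definition above) =====
theorem html_suit_spec : Claim_equal_html_suit := by
  intro contract _
  unfold Spec_html_suit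
  exact pv_main contract
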